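-- pv_equiv track=rewrite | github.com/AbigailF1/LeetHub | 1365-how-many-numbers-are-smaller-than-the-current-number/1365-how-many-numbers-are-smaller-than-the-current-number.py | smallerNumbersThanCurrent
-- ===== SOURCE A (Python) =====
-- from typing import List
--
-- def smallerNumbersThanCurrent(nums: List[int]) -> List[int]:
--     sorted_nums= sorted(nums)
--     d={}
--     result=[]
--     for i in range(len(sorted_nums)):
--         if sorted_nums[i] not in d:
--             d[sorted_nums[i]]=i
--     for i in nums:
--         result.append(d[i])
--     return result
-- ===== SOURCE B (Python) =====
-- from typing import List
--
-- def smallerNumbersThanCurrent(nums: List[int]) -> List[int]: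
--     return [sum(1 for x in nums if x < n) for n in nums]
-- ===== Notes on version B (the rewrite author's own statement) =====
-- stated objective: simpler
-- what changed: Replaces the sort + first-index dict table with a direct one-line brute-force count of strictly smaller elements for each position.
import Mathlib
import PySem

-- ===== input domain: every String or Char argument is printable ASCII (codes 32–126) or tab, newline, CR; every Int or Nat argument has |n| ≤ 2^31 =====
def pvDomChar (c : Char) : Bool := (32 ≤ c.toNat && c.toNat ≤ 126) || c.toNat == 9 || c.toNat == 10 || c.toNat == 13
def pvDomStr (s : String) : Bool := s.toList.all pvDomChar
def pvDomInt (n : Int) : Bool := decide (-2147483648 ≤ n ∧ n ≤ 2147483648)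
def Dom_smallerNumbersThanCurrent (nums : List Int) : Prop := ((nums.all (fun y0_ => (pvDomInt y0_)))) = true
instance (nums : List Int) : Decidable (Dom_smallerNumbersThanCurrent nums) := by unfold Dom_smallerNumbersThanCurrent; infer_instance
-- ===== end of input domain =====

-- B replaces A's sort + first-index dict with a direct brute-force count of strictly smaller elements (simpler, one line).

-- ===== PORT A =====
-- literal transliteration of A: sort, build a value -> first-sorted-index dict, then look each element up
def smallerNumbersThanCurrent (nums : List Int) : List Int :=
  let sorted_nums := PySem.List.sorted nums (fun x => x) false
  let d := (PySem.List.pyRange 0 (PySem.List.len sorted_nums) 1).foldl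
    (fun d i =>
      if !(PySem.Dict.contains d (PySem.List.pyGetD sorted_nums i 0)) then
        PySem.Dict.insert d (PySem.List.pyGetD sorted_nums i 0) i
      else d)
    PySem.Dict.empty
  -- d[i] never raises here: every element of nums occurs in sorted_nums, so the key is present
  nums.foldl (fun result i => result ++ [PySem.Dict.getD d i 0]) []

-- ===== PORT B =====
def smallerNumbersThanCurrent_alt (nums : List Int) : List Int :=
  nums.map (fun n => (nums.countP (fun x => decide (x < n)) : Int))

-- ===== PRECONDITION & SPEC =====
def Spec_smallerNumbersThanCurrent (nums : List Int) (out : List Int) : Prop := out = smallerNumbersThanCurrent_alt nums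
instance (nums : List Int) (out : List Int) : Decidable (Spec_smallerNumbersThanCurrent nums out) := by unfold Spec_smallerNumbersThanCurrent; infer_instance

-- ===== CLAIM (what is proved, stated in full; the proofs are below) =====
def Claim_equal_smallerNumbersThanCurrent : Prop := ∀ (nums : List Int), Dom_smallerNumbersThanCurrent nums → Spec_smallerNumbersThanCurrent nums (smallerNumbersThanCurrent nums)

-- ===== LEMMAS AND PROOFS =====

-- first index of v in s (as an Int offset), used only to characterise A's dict loop
def pvFirstIdx (s : List Int) (v : Int) : Option Int :=
  match s with
  | [] => none
  | x :: t => if x = v then some 0 else (pvFirstIdx t v).map (· + 1)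

lemma pv_loop_get? (s : List Int) (k : Int) (d0 : PySem.Dict Int Int) (v : Int) :
    ((PySem.List.enumerate s k).foldl
      (fun d p => if !(PySem.Dict.contains d p.2) then PySem.Dict.insert d p.2 p.1 else d) d0).get? v =
    (if PySem.Dict.contains d0 v then d0.get? v else (pvFirstIdx s v).map (k + ·)) := by
  induction s generalizing k d0 with
  | nil =>
    simp only [PySem.List.enumerate_nil, List.foldl_nil, pvFirstIdx, Option.map_none]
    split
    · rfl
    · rename_i h
      rw [PySem.Dict.contains_eq_isSome_get?] at h
      simpa using h
  | cons x t ih =>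
    rw [PySem.List.enumerate_cons]
    simp only [List.foldl_cons]
    by_cases hc : PySem.Dict.contains d0 x
    · simp only [hc, Bool.not_true, Bool.false_eq_true, if_false, ih]
      by_cases hv : PySem.Dict.contains d0 v
      · simp [hv]
      · simp only [hv, pvFirstIdx]
        by_cases hxv : x = v
        · subst hxv; simp [hc] at hv
        · simp only [hxv, if_false, Option.map_map]
          cases pvFirstIdx t v with
          | none => rfl
          | some j => simp [Function.comp]; ring
    · simp only [hc, Bool.not_false, if_true, ih]
      by_cases hxv : x = v
      · subst hxv
        rw [PySem.Dict.contains_insert_self, if_pos rfl, PySem.Dict.get?_insert_self]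
        simp [pvFirstIdx, hc]
      · rw [PySem.Dict.contains_insert]
        have hne : v ≠ x := fun h => hxv h.symm
        have hbe : (v == x) = false := by simp [hne]
        simp only [hbe, Bool.false_or]
        rw [PySem.Dict.get?_insert_of_ne _ _ hne]
        by_cases hv : PySem.Dict.contains d0 v
        · simp [hv]
        · simp only [hv, if_false, pvFirstIdx, hxv, Option.map_map]
          cases pvFirstIdx t v with
          | none => rfl
          | some j => simp [Function.comp]; ring

lemma pv_firstIdx_sorted (s : List Int) (hs : s.Pairwise (· ≤ ·)) (v : Int) (hv : v ∈ s) :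
    pvFirstIdx s v = some ((s.countP (fun x => decide (x < v)) : Int)) := by
  induction s with
  | nil => cases hv
  | cons x t ih =>
    rw [List.pairwise_cons] at hs
    by_cases hxv : x = v
    · subst hxv
      have hz : t.countP (fun y => decide (y < x)) = 0 :=
        List.countP_eq_zero.2 (fun y hy => by simp [not_lt.2 (hs.1 y hy)])
      simp [pvFirstIdx, hz]
    · have hvt : v ∈ t := by cases hv with | head => exact absurd rfl hxv | tail _ h => exact h
      have hxlt : x < v := lt_of_le_of_ne (hs.1 v hvt) hxv
      rw [pvFirstIdx]
      simp only [hxv, if_false, ih hs.2 hvt, List.countP_cons]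
      simp [hxlt]

-- ===== VERDICT (by name: the statement is the Claim_ definition above) =====
theorem smallerNumbersThanCurrent_spec : Claim_equal_smallerNumbersThanCurrent := by
  intro nums _
  unfold Spec_smallerNumbersThanCurrent smallerNumbersThanCurrent smallerNumbersThanCurrent_alt
  rw [PySem.List.foldl_append_singleton_eq_map]
  apply List.map_congr_left
  intro v hv
  have hmem : v ∈ PySem.List.sorted nums (fun x => x) false :=
    (PySem.List.mem_sorted _ _ _ _).2 hv
  have hperm := PySem.List.sorted_perm (xs := nums) (key := fun x => x) (rev := false)
  have hpw : (PySem.List.sorted nums (fun x => x) false).Pairwise (· ≤ ·) := by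
    simpa using PySem.List.sorted_pairwise (xs := nums) (key := fun x => x)
  -- rewrite the index loop over pyRange into a loop over enumerate
  have hloop :
      (PySem.List.pyRange 0 (PySem.List.len (PySem.List.sorted nums (fun x => x) false)) 1).foldl
        (fun d i =>
          if !(PySem.Dict.contains d (PySem.List.pyGetD (PySem.List.sorted nums (fun x => x) false) i 0)) then
            PySem.Dict.insert d (PySem.List.pyGetD (PySem.List.sorted nums (fun x => x) false) i 0) i
          else d)
        PySem.Dict.empty =
      (PySem.List.enumerate (PySem.List.sorted nums (fun x => x) false) 0).foldl
        (fun d p => if !(PySem.Dict.contains d p.2) then PySem.Dict.insert d p.2 p.1 else d)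
        PySem.Dict.empty := by
    rw [PySem.List.enumerate_eq_map_pyRange (d := 0), List.foldl_map]
  rw [hloop, PySem.Dict.getD_eq_get?_getD, pv_loop_get?,
      pv_firstIdx_sorted _ hpw v hmem]
  simp [hperm.countP_eq]
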